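-- pv_equiv track=rewrite | github.com/husinthewei/CIS530P | dateExtension.py | __sent2features
-- ===== SOURCE A (Python) =====
-- def __sent2features(sent, ft):
--     doc = sent.split()
--     crime_terms = ["killed", "shot", "died", "shooting"]
--     #police_terms = ["Police", "Department"]
--     court_terms = ["court", "Court", "Courthouse", "prison", "trial", "sentenced", "sentencing"]
--     misleading_terms = ["Published"]
--     features = [
--         sum([1 if w in crime_terms else 0 for w in doc]),
--         sum([1 if w in court_terms else 0 for w in doc]),
--         sum([1 if w in misleading_terms else 0 for w in doc]),
--         ft
--     ]
--     return features
-- ===== SOURCE B (Python) =====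
-- def __sent2features(sent, ft):
--     # Build a word-frequency table once, then answer each feature by dictionary lookups.
--     counts = {}
--     for w in sent.split():
--         counts[w] = counts.get(w, 0) + 1
--     crime = sum(counts.get(t, 0) for t in ["killed", "shot", "died", "shooting"])
--     court = sum(counts.get(t, 0) for t in
--                 ["court", "Court", "Courthouse", "prison", "trial", "sentenced", "sentencing"])
--     misleading = counts.get("Published", 0)
--     return [crime, court, misleading, ft]
-- ===== Notes on version B (the rewrite author's own statement) =====
-- stated objective: alternative
-- what changed: Replaced A's three indicator-comprehension scans over the word list with a word-frequency dictionary built in one pass, from which each feature is the sum of a few constant lookups.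
import Mathlib
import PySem

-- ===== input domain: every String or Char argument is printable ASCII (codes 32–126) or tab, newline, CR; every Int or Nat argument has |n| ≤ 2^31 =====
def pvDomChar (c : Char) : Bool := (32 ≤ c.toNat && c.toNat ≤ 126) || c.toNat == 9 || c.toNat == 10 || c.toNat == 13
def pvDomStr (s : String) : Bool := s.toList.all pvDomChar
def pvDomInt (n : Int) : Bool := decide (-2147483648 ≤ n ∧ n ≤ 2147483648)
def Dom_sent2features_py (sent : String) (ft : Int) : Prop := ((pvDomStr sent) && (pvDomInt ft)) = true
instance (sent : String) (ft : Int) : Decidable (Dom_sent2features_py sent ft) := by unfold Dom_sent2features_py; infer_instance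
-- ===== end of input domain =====

-- B builds a word-frequency dictionary in one pass and derives each feature from a few
-- dictionary lookups, instead of A's three indicator-comprehension scans; same return value.

-- ===== PORT A =====
def sent2features_py (sent : String) (ft : Int) : List Int :=
  let doc := PySem.Str.split₀ sent
  let crime_terms : List String := ["killed", "shot", "died", "shooting"]
  let court_terms : List String := ["court", "Court", "Courthouse", "prison", "trial", "sentenced", "sentencing"]
  let misleading_terms : List String := ["Published"]
  [ (doc.map (fun w => if w ∈ crime_terms then (1 : Int) else 0)).sum,
    (doc.map (fun w => if w ∈ court_terms then (1 : Int) else 0)).sum,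
    (doc.map (fun w => if w ∈ misleading_terms then (1 : Int) else 0)).sum,
    ft ]

-- ===== PORT B =====
def sent2features_py_alt (sent : String) (ft : Int) : List Int :=
  let counts : PySem.Dict String Int :=
    (PySem.Str.split₀ sent).foldl (fun d w => d.insert w (d.getD w 0 + 1)) PySem.Dict.empty
  let crime := (["killed", "shot", "died", "shooting"] : List String).foldl
    (fun s t => s + counts.getD t 0) 0
  let court := (["court", "Court", "Courthouse", "prison", "trial", "sentenced", "sentencing"] : List String).foldl
    (fun s t => s + counts.getD t 0) 0
  let misleading := counts.getD "Published" 0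
  [crime, court, misleading, ft]

-- ===== PRECONDITION & SPEC =====
def Spec_sent2features_py (sent : String) (ft : Int) (out : List Int) : Prop := out = sent2features_py_alt sent ft
instance (sent : String) (ft : Int) (out : List Int) : Decidable (Spec_sent2features_py sent ft out) := by unfold Spec_sent2features_py; infer_instance

-- ===== CLAIM (what is proved, stated in full; the proofs are below) =====
def Claim_equal_sent2features_py : Prop := ∀ (sent : String) (ft : Int), Dom_sent2features_py sent ft → Spec_sent2features_py sent ft (sent2features_py sent ft)

-- ===== LEMMAS AND PROOFS =====

-- Summing the indicator [t = x] over a duplicate-free term list gives the membership indicator.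
theorem pv_sum_indicator (terms : List String) (h : terms.Nodup) (x : String) :
    (terms.map (fun t => if x = t then (1 : Int) else 0)).sum
      = (if x ∈ terms then (1 : Int) else 0) := by
  induction terms with
  | nil => simp
  | cons y ys ih =>
    have hnd := List.nodup_cons.mp h
    by_cases hxy : x = y
    · subst hxy
      simp [ih hnd.2, if_neg hnd.1]
    · simp [hxy, ih hnd.2, List.mem_cons]

-- Summing per-term occurrence counts over a duplicate-free term list equals A's indicator sum.
theorem pv_sum_counts (terms : List String) (h : terms.Nodup) (doc : List String) :
    (terms.map (fun t => (doc.count t : Int))).sum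
      = (doc.map (fun w => if w ∈ terms then (1 : Int) else 0)).sum := by
  induction doc with
  | nil => simp
  | cons x xs ih =>
    have : (terms.map (fun t => ((x :: xs).count t : Int)))
        = terms.map (fun t => (xs.count t : Int) + (if x = t then (1 : Int) else 0)) := by
      apply List.map_congr_left
      intro t _
      by_cases hx : x = t <;> simp [hx]
    rw [this]
    simp only [List.map_cons, List.sum_cons]
    rw [List.sum_map_add]  -- split into two sums
    rw [ih, pv_sum_indicator terms h x]
    ring

-- B's left fold with (+ lookup) is the sum of the per-term lookups.
theorem pv_foldl_add_lookup (counts : PySem.Dict String Int) (terms : List String) (s : Int) :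
    terms.foldl (fun s t => s + counts.getD t 0) s
      = s + (terms.map (fun t => counts.getD t 0)).sum := by
  induction terms generalizing s with
  | nil => simp
  | cons t ts ih => simp [ih, add_assoc]

-- ===== VERDICT (by name: the statement is the Claim_ definition above) =====
theorem sent2features_py_spec : Claim_equal_sent2features_py := by
  intro sent ft _
  unfold Spec_sent2features_py sent2features_py sent2features_py_alt
  dsimp only
  rw [PySem.Dict.foldl_insert_getD_add_one_eq_counter]
  rw [pv_foldl_add_lookup, pv_foldl_add_lookup]
  simp only [PySem.Dict.getD_counter]
  rw [pv_sum_counts _ (by decide), pv_sum_counts _ (by decide)]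
  have h := pv_sum_counts ["Published"] (by decide) (PySem.Str.split₀ sent)
  simp only [List.map_cons, List.map_nil, List.sum_cons, List.sum_nil, add_zero,
    List.mem_singleton] at h
  simp [← h]
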